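-- pv_equiv track=rewrite | github.com/981377660LMT/algorithm-study | 6_tree/树的性质/树哈希/LCP 80. 生物进化录-树的最小表示.py | evolutionaryRecord2
-- ===== SOURCE A (Python) =====
-- from collections import deque
-- from typing import Deque, List
--
-- def evolutionaryRecord2(parents: List[int]) -> str:
--     """O(nlogn) 双端队列优化字符串的拼接.
--
--     可以把字符串改成双端队列,拼接的时候用启发式合并/启发式分裂,也是O(nlogn)的
--     """
--     n = len(parents)
--     adjList = [[] for _ in range(n)]
--     for i, p in enumerate(parents):
--         if p != -1:
--             adjList[p].append(i)
--
--     def dfs(cur: int, pre: int) -> Deque[int]: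
--         sub = sorted([dfs(next, cur) for next in adjList[cur] if next != pre])
--         res = deque()
--         for d in sub:
--             if len(res) > len(d):
--                 while d:
--                     res.append(d.popleft())
--             else:
--                 res, d = d, res
--                 while d:
--                     res.appendleft(d.pop())
--         res.appendleft(0)
--         res.append(1)
--         return res
--
--     res = dfs(0, -1)
--     while res and res[-1] == 1:  # 去掉返回根节点的路径
--         res.pop()
--     res.popleft()  # 去掉根节点0
--     return "".join(map(str, res))
-- ===== SOURCE B (Python) =====
-- def evolutionaryRecord2(parents):
--     """Simpler: each subtree becomes a plain string directly ('0' + sorted children + '1');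
--     the deque small-to-large merge loop disappears; root trim via rstrip('1') and [1:]."""
--     n = len(parents)
--     adjList = [[] for _ in range(n)]
--     for i, p in enumerate(parents):
--         if p != -1:
--             adjList[p].append(i)
--
--     def dfs(cur, pre):
--         return "0" + "".join(sorted(dfs(nxt, cur) for nxt in adjList[cur] if nxt != pre)) + "1"
--
--     return dfs(0, -1).rstrip("1")[1:]
-- ===== Notes on version B (the rewrite author's own statement) =====
-- stated objective: simpler
-- what changed: Each subtree is rendered directly as the string '0' + ''.join(sorted(children)) + '1', eliminating A's deque representation, its small-to-large merge loop with explicit popleft/appendleft element moves, and its trailing-1 pop loop (replaced by rstrip('1') and a slice).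
import Mathlib
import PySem

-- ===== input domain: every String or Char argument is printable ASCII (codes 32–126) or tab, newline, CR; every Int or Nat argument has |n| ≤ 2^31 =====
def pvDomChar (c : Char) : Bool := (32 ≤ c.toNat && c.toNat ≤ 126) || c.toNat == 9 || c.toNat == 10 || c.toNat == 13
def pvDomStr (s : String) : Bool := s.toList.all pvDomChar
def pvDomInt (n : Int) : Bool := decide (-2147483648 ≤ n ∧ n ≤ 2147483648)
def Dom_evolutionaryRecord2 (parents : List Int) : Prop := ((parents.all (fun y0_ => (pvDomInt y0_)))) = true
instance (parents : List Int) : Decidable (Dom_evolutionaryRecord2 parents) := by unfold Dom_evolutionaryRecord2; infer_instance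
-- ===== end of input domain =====

-- B builds each subtree's canonical string directly ('0' ++ sorted children ++ '1'),
-- replacing A's deque small-to-large merge loop; root trim via rstrip('1') then [1:]. Objective: simpler.

-- ===== PORT A =====
-- 'adjList[p].append(i)' with Python's negative-index wraparound; an out-of-range p
-- (excluded by Pre_) raises IndexError in Python.  Both Pythons build the adjacency
-- list with this identical loop, so both ports share this helper.
def pvAdjAppend (adj : List (List Int)) (p : Int) (i : Int) : List (List Int) :=
  let idx := if p < 0 then p + adj.length else p
  adj.modify idx.toNat (fun l => l ++ [i])

def pvBuildAdj (parents : List Int) : List (List Int) :=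
  (PySem.List.enumerate parents).foldl
    (fun adj ip => if ip.2 ≠ -1 then pvAdjAppend adj ip.2 ip.1 else adj)
    ((List.range parents.length).map (fun _ => ([] : List Int)))

-- 'while d: res.append(d.popleft())'
def pvAppendLoop (res d : List Int) : List Int := d.foldl (fun r x => r ++ [x]) res
-- 'res, d = d, res; while d: res.appendleft(d.pop())' (pops old res from the right, prepends)
def pvSwapLoop (res d : List Int) : List Int := res.reverse.foldl (fun r x => x :: r) d

-- A's dfs; a deque of 0/1 ints is a List Int.  Recursion is fueled: fuel = n+1 suffices on
-- every input Pre_ admits (dfs paths repeat no node except at most one immediate 0→0 self-loop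
-- step); Python recurses unboundedly (RecursionError exactly on the inputs Pre_'s cycle clause
-- excludes).  'adjList[cur]': cur is always a valid index when called under Pre_.
def pvDfsA (adj : List (List Int)) : Nat → Int → Int → List Int
  | 0, _, _ => []
  | fuel+1, cur, pre =>
    let sub := PySem.List.sorted
      (((adj.getD cur.toNat []).filter (fun nxt => nxt ≠ pre)).map (fun nxt => pvDfsA adj fuel nxt cur))
      (fun d => d) false
    let res := sub.foldl
      (fun res d => if res.length > d.length then pvAppendLoop res d else pvSwapLoop res d) []
    0 :: (res ++ [1])

-- 'while res and res[-1] == 1: res.pop()'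
def pvTrimLoop (res : List Int) : List Int :=
  if _h : res.getLast? = some 1 then pvTrimLoop res.dropLast else res
termination_by res.length
decreasing_by
  cases res with
  | nil => simp at _h
  | cons a t => simp [List.length_dropLast]

def evolutionaryRecord2 (parents : List Int) : String :=
  let adj := pvBuildAdj parents
  let res := pvDfsA adj (parents.length + 1) 0 (-1)
  let res := pvTrimLoop res
  -- res.popleft(): res is nonempty here under Pre_ (it starts with the root's 0)
  let res := res.tail
  PySem.Str.join "" (res.map (fun x => PySem.Int.toStr x))

-- ===== PORT B =====
-- B's dfs returns the subtree's string, represented as its List Char (PySem.Chars);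
-- same fuel discipline as A's port.
def pvDfsB (adj : List (List Int)) : Nat → Int → Int → List Char
  | 0, _, _ => []
  | fuel+1, cur, pre =>
    '0' :: (PySem.Chars.join []
      (PySem.List.sorted
        (((adj.getD cur.toNat []).filter (fun nxt => nxt ≠ pre)).map (fun nxt => pvDfsB adj fuel nxt cur))
        (fun s => s) false) ++ ['1'])

-- s.rstrip("1"): drop trailing '1' characters (exact)
def pvRstrip1 (s : List Char) : List Char := (s.reverse.dropWhile (fun c => c == '1')).reverse

def evolutionaryRecord2_alt (parents : List Int) : String :=
  let adj := pvBuildAdj parents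
  -- s[1:] is .tail (PySem.List.slice_from_one)
  String.ofList ((pvRstrip1 (pvDfsB adj (parents.length + 1) 0 (-1))).tail)

-- ===== PRECONDITION & SPEC =====
-- one step up the (wraparound-resolved) parent map; none at a root (-1) or a missing index
def pvParentStep (parents : List Int) (i : Nat) : Option Nat :=
  match parents[i]? with
  | none => none
  | some p =>
    if p = -1 then none
    else some (if p < 0 then p + parents.length else p).toNat

-- Pre_ holds exactly where the Python A returns normally: a nonempty list whose entries are in
-- Python's index range (else IndexError), with no parent cycle through node 0 of length ≥ 3
-- (else the dfs recurses forever — RecursionError; self-loops and 2-cycles at node 0 are cut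
-- off by the 'next != pre' filter and terminate).
def Pre_evolutionaryRecord2 (parents : List Int) : Prop :=
  parents ≠ [] ∧
    (∀ p ∈ parents, -(parents.length : Int) ≤ p ∧ p < (parents.length : Int)) ∧
    ((fun o => o.bind (pvParentStep parents))^[1] (some 0) = some 0 ∨
     (fun o => o.bind (pvParentStep parents))^[2] (some 0) = some 0 ∨
     ∀ k < parents.length + 1, 3 ≤ k →
       (fun o => o.bind (pvParentStep parents))^[k] (some 0) ≠ some 0)
instance (parents : List Int) : Decidable (Pre_evolutionaryRecord2 parents) := by
  unfold Pre_evolutionaryRecord2; infer_instance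

def pvWitness_evolutionaryRecord2 : List Int := [-1, 0, 0, 1]

def Spec_evolutionaryRecord2 (parents : List Int) (out : String) : Prop := out = evolutionaryRecord2_alt parents
instance (parents : List Int) (out : String) : Decidable (Spec_evolutionaryRecord2 parents out) := by unfold Spec_evolutionaryRecord2; infer_instance

-- ===== CLAIM (what is proved, stated in full; the proofs are below) =====
def Claim_equal_evolutionaryRecord2 : Prop := ∀ (parents : List Int), Dom_evolutionaryRecord2 parents → Pre_evolutionaryRecord2 parents → Spec_evolutionaryRecord2 parents (evolutionaryRecord2 parents)

-- ===== LEMMAS AND PROOFS =====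

-- the encoding 0 ↦ '0', 1 ↦ '1' connecting A's deques to B's strings
def pvBit (x : Int) : Char := if x == 1 then '1' else '0'

def pvBits (l : List Int) : Prop := ∀ x ∈ l, x = 0 ∨ x = 1

-- the two merge-loop branches are both plain concatenation
theorem pvAppendLoop_eq (res d : List Int) : pvAppendLoop res d = res ++ d :=
  PySem.List.foldl_append_singleton_eq_self d res

theorem pvSwapLoop_eq (res d : List Int) : pvSwapLoop res d = res ++ d := by
  simp [pvSwapLoop, List.foldl_reverse]

theorem pvMerge_eq (sub : List (List Int)) (acc : List Int) :
    sub.foldl (fun res d => if res.length > d.length then pvAppendLoop res d else pvSwapLoop res d) acc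
      = acc ++ sub.flatten := by
  rw [PySem.List.foldl_congr_mem sub _ (fun res d => res ++ d) acc
    (by intro acc x _; by_cases h : acc.length > x.length <;>
        simp [h, pvAppendLoop_eq, pvSwapLoop_eq])]
  exact PySem.List.foldl_append_eq_flatten sub acc

theorem pvJoinNil (ps : List (List Char)) : PySem.Chars.join [] ps = ps.flatten := by
  induction ps with
  | nil => simp [PySem.Chars.join_nil]
  | cons p rest ih =>
    cases rest with
    | nil => simp [PySem.Chars.join_singleton]
    | cons q r => simp [PySem.Chars.join_cons_cons, ih]

-- dfsA only produces 0s and 1s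
theorem pvDfsA_bits (adj : List (List Int)) (fuel : Nat) :
    ∀ cur pre, pvBits (pvDfsA adj fuel cur pre) := by
  induction fuel with
  | zero => intro cur pre x hx; simp [pvDfsA] at hx
  | succ fuel ih =>
    intro cur pre x hx
    simp only [pvDfsA, pvMerge_eq, List.nil_append] at hx
    rcases List.mem_cons.mp hx with h | h
    · left; exact h
    rcases List.mem_append.mp h with h | h
    · rcases List.mem_flatten.mp h with ⟨d, hd, hxd⟩
      rw [PySem.List.mem_sorted] at hd
      rcases List.mem_map.mp hd with ⟨nxt, _, rfl⟩
      exact ih nxt cur x hxd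
    · right; simpa using h

-- pvBit is strictly monotone on 0/1 lists (lexicographically)
theorem pvBit_lt_iff {x y : Int} (hx : x = 0 ∨ x = 1) (hy : y = 0 ∨ y = 1) :
    (pvBit x < pvBit y ↔ x < y) ∧ (pvBit x = pvBit y ↔ x = y) := by
  rcases hx with rfl | rfl <;> rcases hy with rfl | rfl <;> refine ⟨?_, ?_⟩ <;> simp [pvBit]

theorem pvLex_map_iff (a b : List Int) (ha : pvBits a) (hb : pvBits b) :
    (a.map pvBit < b.map pvBit) ↔ a < b := by
  show List.Lex (· < ·) (a.map pvBit) (b.map pvBit) ↔ List.Lex (· < ·) a b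
  induction a generalizing b with
  | nil =>
    cases b with
    | nil => simp
    | cons y t => simpa using List.Lex.nil
  | cons x a ih =>
    cases b with
    | nil => simpa using List.not_lex_nil
    | cons y b =>
      have hx := ha x (by simp)
      have hy := hb y (by simp)
      simp only [List.map_cons, List.cons_lex_cons_iff]
      rw [(pvBit_lt_iff hx hy).1, (pvBit_lt_iff hx hy).2,
        ih b (fun z hz => ha z (by simp [hz])) (fun z hz => hb z (by simp [hz]))]

theorem pvInsertBy_map (x : List Int) (ys : List (List Int)) (hx : pvBits x)
    (hys : ∀ y ∈ ys, pvBits y) :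
    PySem.List.insertBy (fun a b => decide (a < b)) (x.map pvBit) (ys.map (List.map pvBit))
      = (PySem.List.insertBy (fun a b => decide (a < b)) x ys).map (List.map pvBit) := by
  induction ys with
  | nil => rfl
  | cons y ys ih =>
    have hy := hys y (by simp)
    have h1 : decide (x.map pvBit < y.map pvBit) = decide (x < y) := by
      simp [pvLex_map_iff x y hx hy]
    simp only [List.map_cons, PySem.List.insertBy, h1]
    split
    · rfl
    · simp [ih (fun z hz => hys z (by simp [hz]))]

theorem pvSorted_map (xs : List (List Int)) (hxs : ∀ y ∈ xs, pvBits y) :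
    PySem.List.sorted (xs.map (List.map pvBit)) (fun s => s) false
      = (PySem.List.sorted xs (fun d => d) false).map (List.map pvBit) := by
  rw [PySem.List.sorted_eq_foldl_insertBy, PySem.List.sorted_eq_foldl_insertBy]
  have : ∀ (acc : List (List Int)), (∀ y ∈ acc, pvBits y) →
      (xs.map (List.map pvBit)).foldl
        (fun acc x => PySem.List.insertBy (fun a b => decide (a < b)) x acc) (acc.map (List.map pvBit))
      = (xs.foldl (fun acc x => PySem.List.insertBy (fun a b => decide (a < b)) x acc) acc).map (List.map pvBit) := by
    induction xs with
    | nil => intro acc _; rfl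
    | cons x xs ih =>
      intro acc hacc
      simp only [List.map_cons, List.foldl_cons]
      rw [pvInsertBy_map x acc (hxs x (by simp)) hacc]
      exact (by
        have := ih (fun y hy => hxs y (by simp [hy]))
          (PySem.List.insertBy (fun a b => decide (a < b)) x acc)
          (by intro y hy
              rcases (PySem.List.mem_insertBy _ _ _ _).mp hy with rfl | hy
              · exact hxs y (by simp)
              · exact hacc y hy)
        simpa using this)
  simpa using this [] (by intro y hy; simp at hy)

-- the core correspondence: B's string is A's deque under pvBit
theorem pvDfs_eq (adj : List (List Int)) (fuel : Nat) :
    ∀ cur pre, pvDfsB adj fuel cur pre = (pvDfsA adj fuel cur pre).map pvBit := by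
  induction fuel with
  | zero => intro cur pre; rfl
  | succ fuel ih =>
    intro cur pre
    have hmapeq : ((adj.getD cur.toNat []).filter (fun nxt => nxt ≠ pre)).map (fun nxt => pvDfsB adj fuel nxt cur)
        = (((adj.getD cur.toNat []).filter (fun nxt => nxt ≠ pre)).map (fun nxt => pvDfsA adj fuel nxt cur)).map (List.map pvBit) := by
      simp only [List.map_map]
      exact List.map_congr_left (fun nxt _ => ih nxt cur)
    simp only [pvDfsB, pvDfsA, pvMerge_eq, List.nil_append, hmapeq]
    rw [pvSorted_map _ (by intro y hy; rcases List.mem_map.mp hy with ⟨nxt, _, rfl⟩; exact pvDfsA_bits adj fuel nxt cur)]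
    rw [pvJoinNil]
    simp [pvBit, ← List.map_flatten]

-- A's trim loop is reverse-dropWhile-reverse
theorem pvTrimLoop_eq (res : List Int) :
    pvTrimLoop res = (res.reverse.dropWhile (fun x => x == 1)).reverse := by
  induction res using pvTrimLoop.induct with
  | case1 res h ih =>
    rw [pvTrimLoop, dif_pos h, ih]
    have hne : res ≠ [] := by rintro rfl; simp at h
    have hlast : res.getLast hne = 1 := by
      have h2 := List.getLast?_eq_some_getLast (l := res) hne
      rw [h] at h2
      simpa using h2.symm
    have hrev : res.reverse = 1 :: res.dropLast.reverse := by
      conv_lhs => rw [← List.dropLast_concat_getLast hne]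
      simp [hlast]
    rw [hrev]
    simp
  | case2 res h =>
    rw [pvTrimLoop, dif_neg h]
    rcases hr : res.reverse with _ | ⟨c, t⟩
    · simpa using congrArg List.reverse hr.symm
    · have hc : res.getLast? = some c := by
        rw [← List.head?_reverse, hr]; rfl
      have hcne : c ≠ 1 := by rintro rfl; exact h hc
      rw [List.dropWhile_cons_of_neg (by simpa using hcne)]
      rw [← hr, List.reverse_reverse]

theorem pvJoin_bits (l : List Int) (hl : pvBits l) :
    PySem.Str.join "" (l.map (fun x => PySem.Int.toStr x)) = String.ofList (l.map pvBit) := by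
  rw [← String.toList_inj, PySem.Str.toList_join]
  have hmap : (l.map (fun x => PySem.Int.toStr x)).map String.toList
      = (l.map pvBit).map (fun c => [c]) := by
    simp only [List.map_map]
    apply List.map_congr_left
    intro x hx
    rcases hl x hx with rfl | rfl <;> rfl
  rw [hmap]
  simpa using PySem.Chars.join_nil_singletons (l.map pvBit)

-- ===== VERDICT (by name: the statement is the Claim_ definition above) =====
theorem evolutionaryRecord2_spec : Claim_equal_evolutionaryRecord2 := by
  intro parents _ _
  unfold Spec_evolutionaryRecord2 evolutionaryRecord2 evolutionaryRecord2_alt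
  simp only
  rw [pvDfs_eq]
  set A := pvDfsA (pvBuildAdj parents) (parents.length + 1) 0 (-1) with hA
  have hbits := pvDfsA_bits (pvBuildAdj parents) (parents.length + 1) 0 (-1)
  rw [← hA] at hbits
  have hp : ((fun c => c == '1') ∘ pvBit) = (fun x : Int => x == 1) := by
    funext x
    by_cases hx1 : x = 1 <;> simp [pvBit, Function.comp, hx1]
  have h1 : pvRstrip1 (A.map pvBit) = (pvTrimLoop A).map pvBit := by
    rw [pvTrimLoop_eq]
    unfold pvRstrip1
    rw [← List.map_reverse, List.dropWhile_map, hp, ← List.map_reverse]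
  rw [h1, ← List.map_tail]
  rw [pvJoin_bits]
  intro x hx
  refine hbits x ?_
  have h2 := List.mem_of_mem_tail hx
  rw [pvTrimLoop_eq, List.mem_reverse] at h2
  have h3 := (List.dropWhile_sublist _).subset h2
  rw [List.mem_reverse] at h3
  exact h3
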